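-- pv_equiv track=rewrite | github.com/catmaim/atmprovice | find_odd_sq.py | count_unescaped
-- ===== SOURCE A (Python) =====
-- def count_unescaped(s, quote):
--     count = 0
--     i = 0
--     while i < len(s):
--         if s[i] == quote:
--             bs_count = 0
--             j = i - 1
--             while j >= 0 and s[j] == '\\':
--                 bs_count += 1
--                 j -= 1
--             if bs_count % 2 == 0:
--                 count += 1
--         i += 1
--     return count
-- ===== SOURCE B (Python) =====
-- def count_unescaped(s, quote):
--     count = 0
--     run = 0  # length of the run of backslashes immediately before position i
--     for c in s:
--         if c == quote and run % 2 == 0: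
--             count += 1
--         run = run + 1 if c == '\\' else 0
--     return count
-- ===== Notes on version B (the rewrite author's own statement) =====
-- stated objective: faster
-- what changed: Replaced the inner backward scan over preceding backslashes by a single forward pass that maintains the running length of the current backslash run, testing its parity at each quote.
import Mathlib
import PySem

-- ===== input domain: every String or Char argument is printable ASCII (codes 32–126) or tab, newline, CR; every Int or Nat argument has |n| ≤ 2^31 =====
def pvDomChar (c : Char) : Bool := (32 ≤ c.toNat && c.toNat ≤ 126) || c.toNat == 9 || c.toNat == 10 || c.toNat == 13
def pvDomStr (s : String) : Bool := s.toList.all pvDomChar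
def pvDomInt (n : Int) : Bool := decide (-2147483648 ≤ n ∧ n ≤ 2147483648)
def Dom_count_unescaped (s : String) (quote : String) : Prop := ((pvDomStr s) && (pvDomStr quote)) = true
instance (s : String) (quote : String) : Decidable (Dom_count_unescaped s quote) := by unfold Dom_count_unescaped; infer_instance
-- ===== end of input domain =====

-- B replaces A's quadratic backward backslash scan at each quote by one forward pass
-- maintaining the running backslash-run length (objective: faster).

-- ===== PORT A =====
-- inner while loop of A: count consecutive backslashes at indices n-1, n-2, … (stops at the
-- first non-backslash); n = i encodes Python's starting index j = i-1
def pvBsA (cs : List Char) : Nat → Int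
  | 0 => 0
  | n + 1 => if cs.getD n ' ' = '\\' then pvBsA cs n + 1 else 0

-- outer while loop of A, index i, accumulator count
def pvLoopA (cs : List Char) (quote : String) (i : Nat) (count : Int) : Int :=
  if h : i < cs.length then
    pvLoopA cs quote (i + 1)
      (if String.ofList [cs[i]] = quote ∧ pvBsA cs i % 2 = 0 then count + 1 else count)
  else count
termination_by cs.length - i

def count_unescaped (s : String) (quote : String) : Int :=
  pvLoopA s.toList quote 0 0

-- ===== PORT B =====
-- single forward pass: state (run = backslash-run length just before the current char, count)
def pvLoopB (quote : String) : List Char → Int → Int → Int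
  | [], _, count => count
  | c :: rest, run, count =>
      pvLoopB quote rest (if c = '\\' then run + 1 else 0)
        (if String.ofList [c] = quote ∧ run % 2 = 0 then count + 1 else count)

def count_unescaped_alt (s : String) (quote : String) : Int :=
  pvLoopB quote s.toList 0 0

-- ===== PRECONDITION & SPEC =====
def Spec_count_unescaped (s : String) (quote : String) (out : Int) : Prop := out = count_unescaped_alt s quote
instance (s : String) (quote : String) (out : Int) : Decidable (Spec_count_unescaped s quote out) := by unfold Spec_count_unescaped; infer_instance

-- ===== CLAIM (what is proved, stated in full; the proofs are below) =====
def Claim_equal_count_unescaped : Prop := ∀ (s : String) (quote : String), Dom_count_unescaped s quote → Spec_count_unescaped s quote (count_unescaped s quote)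

-- ===== LEMMAS AND PROOFS =====

-- invariant: when A's outer loop is at index i, B's run state equals pvBsA cs i
theorem pvLoopA_eq_loopB (cs : List Char) (quote : String) :
    ∀ i count, i ≤ cs.length →
      pvLoopA cs quote i count = pvLoopB quote (cs.drop i) (pvBsA cs i) count := by
  intro i
  induction' hn : cs.length - i with n ih generalizing i
  · intro count hle
    have hi : i = cs.length := by omega
    subst hi
    rw [pvLoopA, dif_neg (by omega), List.drop_length, pvLoopB]
  · intro count hle
    have hlt : i < cs.length := by omega
    rw [pvLoopA, dif_pos hlt, List.drop_eq_getElem_cons hlt, pvLoopB]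
    have hrun : pvBsA cs (i + 1) = (if cs[i] = '\\' then pvBsA cs i + 1 else 0) := by
      simp [pvBsA, List.getD_eq_getElem?_getD, hlt]
    rw [← hrun]
    exact ih (i + 1) (by omega) _ (by omega)

-- ===== VERDICT (by name: the statement is the Claim_ definition above) =====
theorem count_unescaped_spec : Claim_equal_count_unescaped := by
  intro s quote _
  unfold Spec_count_unescaped count_unescaped count_unescaped_alt
  simpa [pvBsA] using pvLoopA_eq_loopB s.toList quote 0 0 (Nat.zero_le _)
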